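-- pv_equiv track=rewrite | github.com/AdamZhouSE/pythonHomework | Code/CodeRecords/2567/60601/236490.py | solve
-- ===== SOURCE A (Python) =====
-- def getSum(low,up,nums):
--     sum = 0
--     if low == up:
--         return nums[low]
--     for i in range(low,up+1):
--         sum = sum + nums[i]
--     return sum
--
-- def solve(nums,lower,upper):
--     sum = []
--     for i in range(len(nums)):
--         for j in range(i,len(nums)):
--             sum.append(getSum(i,j,nums))
--     re = 0
--     for i in sum:
--         if i>=lower and i<=upper:
--             re = re + 1
--     return re
-- ===== SOURCE B (Python) =====
-- def solve(nums, lower, upper):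
--     # prefix sums: every subarray sum is a difference of two prefix sums,
--     # so count pairs i < j with lower <= prefix[j] - prefix[i] <= upper.
--     prefix = [0]
--     s = 0
--     for x in nums:
--         s += x
--         prefix.append(s)
--     count = 0
--     for j in range(1, len(prefix)):
--         pj = prefix[j]
--         for i in range(j):
--             d = pj - prefix[i]
--             if lower <= d <= upper:
--                 count += 1
--     return count
-- ===== Notes on version B (the rewrite author's own statement) =====
-- stated objective: faster
-- what changed: B builds prefix sums once and counts pairs of prefixes whose difference lies in [lower, upper], replacing A's per-subarray re-summation and intermediate list of all subarray sums.
import Mathlib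
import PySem

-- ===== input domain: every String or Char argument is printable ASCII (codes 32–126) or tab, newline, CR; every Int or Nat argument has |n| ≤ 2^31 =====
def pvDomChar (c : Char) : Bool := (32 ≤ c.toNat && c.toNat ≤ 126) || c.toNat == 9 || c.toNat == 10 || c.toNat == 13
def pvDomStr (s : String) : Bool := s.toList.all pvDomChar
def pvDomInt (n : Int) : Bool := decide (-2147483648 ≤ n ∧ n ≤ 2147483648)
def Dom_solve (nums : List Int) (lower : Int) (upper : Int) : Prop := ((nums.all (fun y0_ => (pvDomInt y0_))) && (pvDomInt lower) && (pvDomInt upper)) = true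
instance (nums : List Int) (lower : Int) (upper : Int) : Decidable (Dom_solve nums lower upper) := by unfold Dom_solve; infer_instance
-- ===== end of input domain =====

-- B replaces A's per-subarray re-summation (and its intermediate list of all subarray sums)
-- by one prefix-sum pass followed by counting prefix pairs whose difference lies in [lower, upper].

-- ===== PORT A =====
-- getSum(low, up, nums): nums.getD i 0 is exact here since solve only calls it with 0 ≤ low ≤ up < len(nums)
def getSumA (low : Nat) (up : Nat) (nums : List Int) : Int :=
  if low == up then nums.getD low 0
  else (List.range' low (up + 1 - low)).foldl (fun s i => s + nums.getD i 0) 0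

def solve (nums : List Int) (lower : Int) (upper : Int) : Int :=
  let n := nums.length
  let sums : List Int :=
    (List.range n).foldl (fun acc i =>
      (List.range' i (n - i)).foldl (fun acc2 j => acc2 ++ [getSumA i j nums]) acc) []
  sums.foldl (fun re s => if lower ≤ s ∧ s ≤ upper then re + 1 else re) 0

-- ===== PORT B =====
def solve_alt (nums : List Int) (lower : Int) (upper : Int) : Int :=
  let pr : List Int :=
    (nums.foldl (fun (ps : List Int × Int) x => (ps.1 ++ [ps.2 + x], ps.2 + x)) ([0], 0)).1
  (List.range' 1 (pr.length - 1)).foldl (fun c j =>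
    let pj := pr.getD j 0
    (List.range j).foldl (fun c2 i =>
      let d := pj - pr.getD i 0
      if lower ≤ d ∧ d ≤ upper then c2 + 1 else c2) c) 0

-- ===== PRECONDITION & SPEC =====
def Spec_solve (nums : List Int) (lower : Int) (upper : Int) (out : Int) : Prop := out = solve_alt nums lower upper
instance (nums : List Int) (lower : Int) (upper : Int) (out : Int) : Decidable (Spec_solve nums lower upper out) := by unfold Spec_solve; infer_instance

-- ===== CLAIM (what is proved, stated in full; the proofs are below) =====
def Claim_equal_solve : Prop := ∀ (nums : List Int) (lower : Int) (upper : Int), Dom_solve nums lower upper → Spec_solve nums lower upper (solve nums lower upper)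

-- ===== LEMMAS AND PROOFS =====

-- prefix sum of the first k elements
def pvP (nums : List Int) (k : Nat) : Int := (nums.take k).sum

-- counting foldl = countP
theorem foldl_count {α : Type} (P : α → Prop) [DecidablePred P] (l : List α) (r : Int) :
    l.foldl (fun re s => if P s then re + 1 else re) r
      = r + ((l.countP (fun s => decide (P s)) : Nat) : Int) := by
  induction l generalizing r with
  | nil => simp
  | cons x t ih =>
    simp only [List.foldl_cons, List.countP_cons, ih]
    by_cases h : P x <;> simp [h, add_assoc, add_comm]

-- B's prefix-building loop
theorem fold_prefix (l : List Int) (p : List Int) (s : Int) :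
    l.foldl (fun (ps : List Int × Int) x => (ps.1 ++ [ps.2 + x], ps.2 + x)) (p, s) =
      (p ++ (List.range' 1 l.length).map (fun k => s + (l.take k).sum), s + l.sum) := by
  induction l generalizing p s with
  | nil => simp
  | cons x t ih =>
    simp only [List.foldl_cons, ih, List.length_cons, List.range'_succ, List.map_cons,
      List.take_succ_cons, List.sum_cons, Prod.mk.injEq]
    constructor
    · rw [List.append_assoc]
      simp only [List.singleton_append]
      congr 1
      congr 1
      · simp
      · have h2 : List.range' 2 t.length = (List.range' 1 t.length).map (· + 1) := by
          simp [List.range'_eq_map_range, List.map_map, Nat.add_comm]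
        rw [h2, List.map_map]
        apply List.map_congr_left
        intro k _
        simp only [Function.comp_apply, List.take_succ_cons, List.sum_cons]
        ring
    · ring

theorem prefix_eq (nums : List Int) :
    (nums.foldl (fun (ps : List Int × Int) x => (ps.1 ++ [ps.2 + x], ps.2 + x)) ([0], 0)).1 =
      (List.range (nums.length + 1)).map (pvP nums) := by
  rw [fold_prefix]
  have : List.range (nums.length + 1) = 0 :: (List.range' 1 nums.length) := by
    rw [List.range_eq_range', List.range'_succ]
  rw [this]
  simp [pvP]

theorem take_succ_sum (nums : List Int) (i : Nat) (h : i < nums.length) :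
    pvP nums (i + 1) = pvP nums i + nums.getD i 0 := by
  unfold pvP
  have ht : List.take (i + 1) nums = List.take i nums ++ [nums[i]] := by
    rw [List.take_add_one, List.getElem?_eq_getElem h]
    rfl
  rw [ht, List.sum_append]
  simp [List.getD_eq_getElem?_getD, List.getElem?_eq_getElem h]

theorem sum_range'_getD (nums : List Int) (i m : Nat) (h : i + m ≤ nums.length) :
    ((List.range' i m).map (fun k => nums.getD k 0)).sum = pvP nums (i + m) - pvP nums i := by
  induction m with
  | zero => simp
  | succ m ih =>
    rw [List.range'_1_concat, List.map_append, List.sum_append]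
    rw [ih (by omega), show i + (m + 1) = (i + m) + 1 from rfl]
    have := take_succ_sum nums (i + m) (by omega)
    simp only [List.map_cons, List.map_nil, List.sum_cons, List.sum_nil]
    omega

theorem getSumA_eq (nums : List Int) (i j : Nat) (hij : i ≤ j) (hj : j < nums.length) :
    getSumA i j nums = pvP nums (j + 1) - pvP nums i := by
  unfold getSumA
  by_cases h : i = j
  · subst h
    simp [take_succ_sum nums i hj]
  · simp only [beq_iff_eq, h, if_false]
    rw [PySem.List.foldl_add]
    rw [sum_range'_getD nums i (j + 1 - i) (by omega)]
    have : i + (j + 1 - i) = j + 1 := by omega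
    rw [this]
    ring

-- countP over index ranges as Finset sums
theorem countP_range' (a m : Nat) (q : Nat → Bool) :
    ((List.range' a m).countP q) = ∑ k ∈ Finset.Ico a (a + m), (if q k then 1 else 0) := by
  induction m with
  | zero => simp
  | succ m ih =>
    rw [List.range'_1_concat, List.countP_append, ih,
      show a + (m + 1) = (a + m) + 1 from rfl,
      Finset.sum_Ico_succ_top (by omega)]
    by_cases h : q (a + m) <;> simp [h]

theorem countP_range (n : Nat) (q : Nat → Bool) :
    ((List.range n).countP q) = ∑ k ∈ Finset.range n, (if q k then 1 else 0) := by
  rw [List.range_eq_range', countP_range' 0 n q, Finset.range_eq_Ico]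
  simp

theorem sum_map_range' (a m : Nat) (f : Nat → Nat) :
    ((List.range' a m).map f).sum = ∑ k ∈ Finset.Ico a (a + m), f k := by
  induction m with
  | zero => simp
  | succ m ih =>
    rw [List.range'_1_concat, List.map_append, List.sum_append, ih,
      show a + (m + 1) = (a + m) + 1 from rfl,
      Finset.sum_Ico_succ_top (by omega)]
    simp

theorem sum_map_range (n : Nat) (f : Nat → Nat) :
    ((List.range n).map f).sum = ∑ k ∈ Finset.range n, f k := by
  rw [List.range_eq_range', sum_map_range' 0 n f, Finset.range_eq_Ico, Nat.zero_add]

-- nested counting loop of B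
theorem foldl_nested (Q : Nat → Nat → Prop) [∀ j i, Decidable (Q j i)]
    (L : List Nat) (c0 : Int) :
    L.foldl (fun c j => (List.range j).foldl
        (fun c2 i => if Q j i then c2 + 1 else c2) c) c0
      = c0 + (((L.map (fun j => (List.range j).countP (fun i => decide (Q j i)))).sum : Nat) : Int) := by
  induction L generalizing c0 with
  | nil => simp
  | cons j t ih =>
    simp only [List.foldl_cons, List.map_cons, List.sum_cons]
    rw [foldl_count (Q j), ih]
    push_cast
    ring

-- A as a double Finset sum over prefix-sum differences
theorem solveA_sum (nums : List Int) (lower upper : Int) :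
    solve nums lower upper =
      ((∑ i ∈ Finset.range nums.length, ∑ j ∈ Finset.Ico i nums.length,
        (if lower ≤ pvP nums (j+1) - pvP nums i ∧ pvP nums (j+1) - pvP nums i ≤ upper then 1 else 0) : Nat) : Int) := by
  unfold solve
  simp only [PySem.List.foldl_append_singleton_eq_map, PySem.List.foldl_append_eq_flatMap,
    List.nil_append]
  rw [foldl_count (fun s => lower ≤ s ∧ s ≤ upper), List.countP_flatMap]
  rw [show ((0:Int) + _) = _ from zero_add _]
  congr 1
  rw [show (List.map (List.countP (fun s => decide (lower ≤ s ∧ s ≤ upper)) ∘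
        fun i => List.map (fun j => getSumA i j nums) (List.range' i (nums.length - i))) (List.range nums.length))
      = (List.map (fun i => (List.range' i (nums.length - i)).countP
          (fun j => decide (lower ≤ getSumA i j nums ∧ getSumA i j nums ≤ upper))) (List.range nums.length)) from by
    apply List.map_congr_left; intro i _
    rw [Function.comp_apply, List.countP_map]
    rfl]
  rw [sum_map_range]
  apply Finset.sum_congr rfl
  intro i hi
  rw [countP_range']
  rw [show i + (nums.length - i) = nums.length from by
    simp at hi; omega]
  apply Finset.sum_congr rfl
  intro j hj
  simp only [Finset.mem_Ico] at hj
  simp only [Finset.mem_range] at hi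
  rw [show getSumA i j nums = pvP nums (j+1) - pvP nums i from getSumA_eq nums i j hj.1 hj.2]
  simp

-- B as a double Finset sum over prefix-sum differences
theorem solveB_sum (nums : List Int) (lower upper : Int) :
    solve_alt nums lower upper =
      ((∑ j ∈ Finset.Ico 1 (nums.length + 1), ∑ i ∈ Finset.range j,
        (if lower ≤ pvP nums j - pvP nums i ∧ pvP nums j - pvP nums i ≤ upper then 1 else 0) : Nat) : Int) := by
  unfold solve_alt
  rw [prefix_eq]
  simp only [List.length_map, List.length_range, Nat.add_sub_cancel]
  rw [foldl_nested (fun j i => lower ≤ (List.map (pvP nums) (List.range (nums.length+1))).getD j 0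
        - (List.map (pvP nums) (List.range (nums.length+1))).getD i 0
      ∧ (List.map (pvP nums) (List.range (nums.length+1))).getD j 0
        - (List.map (pvP nums) (List.range (nums.length+1))).getD i 0 ≤ upper)]
  rw [zero_add]
  congr 1
  rw [sum_map_range' 1 nums.length]
  rw [show 1 + nums.length = nums.length + 1 from by omega]
  apply Finset.sum_congr rfl
  intro j hj
  simp only [Finset.mem_Ico] at hj
  rw [countP_range]
  apply Finset.sum_congr rfl
  intro i hi
  simp only [Finset.mem_range] at hi
  rw [PySem.List.getD_map_range _ _ _ _ (by omega), PySem.List.getD_map_range _ _ _ _ (by omega)]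
  simp

-- the two double sums are the same triangular sum
theorem sums_eq (nums : List Int) (lower upper : Int) :
    (∑ i ∈ Finset.range nums.length, ∑ j ∈ Finset.Ico i nums.length,
        (if lower ≤ pvP nums (j+1) - pvP nums i ∧ pvP nums (j+1) - pvP nums i ≤ upper then 1 else 0) : Nat)
      = ∑ j ∈ Finset.Ico 1 (nums.length + 1), ∑ i ∈ Finset.range j,
        (if lower ≤ pvP nums j - pvP nums i ∧ pvP nums j - pvP nums i ≤ upper then 1 else 0) := by
  set n := nums.length
  set f : Nat → Nat → Nat := fun i j =>
    (if lower ≤ pvP nums j - pvP nums i ∧ pvP nums j - pvP nums i ≤ upper then 1 else 0) with hf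
  have step1 : ∀ i : Nat, (∑ j ∈ Finset.Ico i n, f i (j+1)) = ∑ j ∈ Finset.Ico (i+1) (n+1), f i j := by
    intro i
    exact Finset.sum_Ico_add' (fun j => f i j) i n 1
  calc (∑ i ∈ Finset.range n, ∑ j ∈ Finset.Ico i n, f i (j+1))
      = ∑ i ∈ Finset.range n, ∑ j ∈ Finset.Ico (i+1) (n+1), f i j := by
        apply Finset.sum_congr rfl; intro i _; exact step1 i
    _ = ∑ i ∈ Finset.Ico 0 (n+1), ∑ j ∈ Finset.Ico (i+1) (n+1), f i j := by
        rw [Finset.range_eq_Ico, Finset.sum_Ico_succ_top (by omega)]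
        simp
    _ = ∑ j ∈ Finset.Ico 0 (n+1), ∑ i ∈ Finset.Ico 0 j, f i j := Finset.sum_Ico_Ico_comm' 0 (n+1) f
    _ = ∑ j ∈ Finset.Ico 1 (n+1), ∑ i ∈ Finset.range j, f i j := by
        rw [Finset.sum_eq_sum_Ico_succ_bot (by omega), Finset.range_eq_Ico]
        simp

-- ===== VERDICT (by name: the statement is the Claim_ definition above) =====
theorem solve_spec : Claim_equal_solve := by
  intro nums lower upper _
  unfold Spec_solve
  rw [solveA_sum, solveB_sum, sums_eq]
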